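-- pv_equiv track=rewrite | github.com/pwmcclung/practProbs | zero_plentiful.py | zero_plentiful
-- ===== SOURCE A (Python) =====
-- def zero_plentiful(arr):
--
--     # Initialize the count of zero sequences
--     zero_sequence_count = 0
--     # Initialize the length of the current zero sequence
--     current_zero_length = 0
--     # Flag to track if we've encountered at least one zero sequence
--     found_zeros = False
--
--     # Iterate over the elements of the array
--     for num in arr:
--         # If the current number is 0, increment the current_zero_length
--         if num == 0:
--             current_zero_length += 1
--             found_zeros = True  # mark that at least one zero has been found
--         else:
--             # If the current number is not 0, check if we were in a zero sequence
--             if current_zero_length > 0: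
--                 # If the length of the previous zero sequence is less than 4, it's not zero-plentiful
--                 if current_zero_length < 4:
--                     return 0
--                 # If the length of the previous zero sequence is 4 or more, increment zero_sequence_count
--                 else:
--                     zero_sequence_count += 1
--                 # Reset current_zero_length for a new sequence
--                 current_zero_length = 0
--
--     # After the loop finishes, check if there was a trailing zero sequence
--     if current_zero_length > 0:
--         if current_zero_length < 4: # trailing sequence less than 4 - not zero plentiful
--             return 0
--         else:  #trailing sequence is valid
--             zero_sequence_count += 1
--     # If we did not find any zeros
--     if not found_zeros:
--         return 0
--
--     # Return the final count of zero sequences if all of them met the criteria (or zero if not)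
--     return zero_sequence_count
-- ===== SOURCE B (Python) =====
-- def zero_plentiful(arr):
--     # Positional characterization: a zero-run starts at i iff arr[i]==0 and arr[i-1]!=0 (or i==0);
--     # a run is long enough iff the three following elements exist and are zero.
--     n = len(arr)
--     starts = [i for i in range(n) if arr[i] == 0 and (i == 0 or arr[i - 1] != 0)]
--     if all(i + 4 <= n and arr[i + 1] == 0 and arr[i + 2] == 0 and arr[i + 3] == 0
--            for i in starts):
--         return len(starts)
--     return 0
-- ===== Notes on version B (the rewrite author's own statement) =====
-- stated objective: alternative
-- what changed: B characterizes the answer positionally: it collects the run-start indices (a zero whose predecessor is nonzero) with a comprehension over range(n) and validates each start by a fixed three-element lookahead window, instead of A's streaming state machine with a run-length counter, a found_zeros flag and interleaved early returns.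
import Mathlib
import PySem

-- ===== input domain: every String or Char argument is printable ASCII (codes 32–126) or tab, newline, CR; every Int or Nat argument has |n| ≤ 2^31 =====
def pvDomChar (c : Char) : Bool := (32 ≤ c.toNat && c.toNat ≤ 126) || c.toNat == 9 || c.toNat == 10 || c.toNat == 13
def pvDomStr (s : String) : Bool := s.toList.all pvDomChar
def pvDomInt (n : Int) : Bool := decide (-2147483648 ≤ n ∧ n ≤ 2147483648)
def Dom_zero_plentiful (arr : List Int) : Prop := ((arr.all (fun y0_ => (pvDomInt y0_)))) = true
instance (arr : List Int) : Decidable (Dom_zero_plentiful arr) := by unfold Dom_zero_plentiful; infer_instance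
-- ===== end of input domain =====

-- B replaces A's streaming state machine (run-length counter, found flag, early returns) by a
-- positional characterization (run-start indices + a fixed three-element lookahead window);
-- objective: alternative algorithm of the same O(n) cost.

-- ===== PORT A =====
-- A's for-loop with early return, state (zero_sequence_count, current_zero_length, found_zeros)
def zpLoopA : List Int → Int → Int → Bool → Int
  | [], zc, cz, found =>
      -- trailing-sequence check, then the found_zeros check, then return zc
      if 0 < cz then
        if cz < 4 then 0
        else if !found then 0 else zc + 1
      else
        if !found then 0 else zc
  | num :: rest, zc, cz, found =>
      if num == 0 then zpLoopA rest zc (cz + 1) true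
      else
        if 0 < cz then
          if cz < 4 then 0
          else zpLoopA rest (zc + 1) 0 found
        else zpLoopA rest zc cz found

def zero_plentiful (arr : List Int) : Int := zpLoopA arr 0 0 false

-- ===== PORT B =====
-- arr[i] == 0 and (i == 0 or arr[i-1] != 0); every index Python evaluates is in range,
-- so pyGetD's default 0 is never the value read
def zpPred (arr : List Int) (i : Int) : Bool :=
  (PySem.List.pyGetD arr i 0 == 0) && ((i == 0) || !(PySem.List.pyGetD arr (i - 1) 0 == 0))

-- starts = [i for i in range(n) if ...]
def zpStarts (arr : List Int) : List Int :=
  (PySem.List.pyRange 0 (arr.length : Int) 1).filter (zpPred arr)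

-- i + 4 <= n and arr[i+1] == 0 and arr[i+2] == 0 and arr[i+3] == 0
def zpOK (arr : List Int) (i : Int) : Bool :=
  decide (i + 4 ≤ (arr.length : Int)) && (PySem.List.pyGetD arr (i + 1) 0 == 0)
    && (PySem.List.pyGetD arr (i + 2) 0 == 0) && (PySem.List.pyGetD arr (i + 3) 0 == 0)

def zero_plentiful_alt (arr : List Int) : Int :=
  let starts := zpStarts arr
  if starts.all (zpOK arr) then (starts.length : Int) else 0

-- ===== PRECONDITION & SPEC =====
def Spec_zero_plentiful (arr : List Int) (out : Int) : Prop := out = zero_plentiful_alt arr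
instance (arr : List Int) (out : Int) : Decidable (Spec_zero_plentiful arr out) := by unfold Spec_zero_plentiful; infer_instance

-- ===== CLAIM (what is proved, stated in full; the proofs are below) =====
def Claim_equal_zero_plentiful : Prop := ∀ (arr : List Int), Dom_zero_plentiful arr → Spec_zero_plentiful arr (zero_plentiful arr)

-- ===== LEMMAS AND PROOFS =====

def predN (arr : List Int) (k : Nat) : Bool :=
  (arr.getD k 0 == 0) && ((k == 0) || !(arr.getD (k - 1) 0 == 0))
def okN (arr : List Int) (k : Nat) : Bool :=
  decide (k + 4 ≤ arr.length) && (arr.getD (k + 1) 0 == 0)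
    && (arr.getD (k + 2) 0 == 0) && (arr.getD (k + 3) 0 == 0)
theorem zpPred_natCast (arr : List Int) (k : Nat) : zpPred arr (k : Int) = predN arr k := by
  cases k with
  | zero => simp [zpPred, predN, PySem.List.pyGetD_zero, List.getD_eq_getElem?_getD]
  | succ j =>
    have h1 : ((j + 1 : Nat) : Int) - 1 = (j : Int) := by push_cast; ring
    simp only [zpPred, predN, h1, PySem.List.pyGetD_natCast, List.getD_eq_getElem?_getD]
    have hz : (((j + 1 : Nat) : Int) == 0) = false := by
      simp only [beq_eq_false_iff_ne]; omega
    have hzn : ((j + 1 : Nat) == 0) = false := by simp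
    rw [hz, hzn]
    simp
theorem zpOK_natCast (arr : List Int) (k : Nat) : zpOK arr (k : Int) = okN arr k := by
  have e1 : ((k : Int) + 1) = ((k + 1 : Nat) : Int) := by push_cast; ring
  have e2 : ((k : Int) + 2) = ((k + 2 : Nat) : Int) := by push_cast; ring
  have e3 : ((k : Int) + 3) = ((k + 3 : Nat) : Int) := by push_cast; ring
  have e4 : ((k : Int) + 4 ≤ (arr.length : Int)) ↔ (k + 4 ≤ arr.length) := by
    constructor <;> intro h <;> omega
  rw [zpOK, okN, e1, e2, e3, PySem.List.pyGetD_natCast, PySem.List.pyGetD_natCast,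
    PySem.List.pyGetD_natCast, decide_eq_decide.mpr e4]
def natStarts (arr : List Int) : List Nat :=
  (List.range arr.length).filter (predN arr)

theorem zpStarts_eq_nat (arr : List Int) :
    zpStarts arr = (natStarts arr).map (fun k : Nat => (k : Int)) := by
  rw [zpStarts, natStarts, PySem.List.pyRange_one]
  have h : ((arr.length : Int) - 0).toNat = arr.length := by omega
  have hf : (fun k : Nat => (0 : Int) + (k : Int)) = (fun k : Nat => (k : Int)) := by
    funext k; simp
  rw [h, hf, List.filter_map]
  refine congrArg (List.map (fun k : Nat => (k : Int))) (List.filter_congr ?_)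
  intro k _
  simpa [Function.comp] using zpPred_natCast arr k

theorem alt_eq_nat (arr : List Int) :
    zero_plentiful_alt arr =
      if (natStarts arr).all (okN arr) then ((natStarts arr).length : Int) else 0 := by
  rw [zero_plentiful_alt]
  rw [zpStarts_eq_nat, List.all_map, List.length_map]
  have h : (zpOK arr ∘ fun k : Nat => (k : Int)) = okN arr := funext (zpOK_natCast arr)
  rw [h]
def headNZ (ys : List Int) : Prop := ys = [] ∨ ∃ y t, ys = y :: t ∧ y ≠ 0

theorem predN_cons_zero (x : Int) (xs : List Int) :
    predN (x :: xs) 0 = (x == 0) := by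
  simp [predN]

theorem predN_cons_succ_ne (x : Int) (hx : x ≠ 0) (xs : List Int) (k : Nat) :
    predN (x :: xs) (k + 1) = predN xs k := by
  cases k with
  | zero => simp [predN, hx]
  | succ j => simp [predN]

theorem natStarts_cons_ne (x : Int) (hx : x ≠ 0) (xs : List Int) :
    natStarts (x :: xs) = (natStarts xs).map (fun k => k + 1) := by
  rw [natStarts, natStarts, List.length_cons, List.range_succ_eq_map,
    List.filter_cons_of_neg (by simp [predN_cons_zero, hx]), List.filter_map]
  have h : (predN (x :: xs) ∘ Nat.succ) = predN xs := by
    funext k; simpa [Function.comp] using predN_cons_succ_ne x hx xs k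
  rw [h]
theorem natStarts_cons_zero_nz (ys : List Int) (hy : headNZ ys) :
    natStarts ((0 : Int) :: ys) = 0 :: (natStarts ys).map (fun k => k + 1) := by
  rw [natStarts, natStarts, List.length_cons, List.range_succ_eq_map,
    List.filter_cons_of_pos (by simp [predN_cons_zero]), List.filter_map]
  refine congrArg₂ _ rfl (congrArg (List.map _) (List.filter_congr ?_))
  intro k hk
  rcases hy with h0 | ⟨y, t, rfl, hy⟩
  · subst h0; simp at hk
  · cases k with
    | zero => simp [Function.comp, predN, hy]
    | succ j => simp [Function.comp, predN]
theorem natStarts_cons_zero_zero (zs : List Int) :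
    natStarts ((0 : Int) :: zs) =
      0 :: ((natStarts zs).filter (fun k => decide (k ≠ 0))).map (fun k => k + 1) := by
  rw [natStarts, natStarts, List.length_cons, List.range_succ_eq_map,
    List.filter_cons_of_pos (by simp [predN_cons_zero]), List.filter_map,
    List.filter_filter]
  refine congrArg₂ _ rfl (congrArg (List.map _) (List.filter_congr ?_))
  intro k _
  cases k with
  | zero => simp [Function.comp, predN]
  | succ j => simp [Function.comp, predN]

theorem natStarts_replicate (k : Nat) (hk : 1 ≤ k) (ys : List Int) (hy : headNZ ys) :
    natStarts (List.replicate k (0 : Int) ++ ys) =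
      0 :: (natStarts ys).map (fun i => i + k) := by
  induction k with
  | zero => omega
  | succ m ih =>
    rcases Nat.eq_or_lt_of_le hk with h1 | h2
    · -- m = 0
      have hm : m = 0 := by omega
      subst hm
      simpa using natStarts_cons_zero_nz ys hy
    · -- m ≥ 1
      have hm : 1 ≤ m := by omega
      have : List.replicate (m + 1) (0 : Int) ++ ys
          = (0 : Int) :: (List.replicate m (0 : Int) ++ ys) := by
        simp [List.replicate_succ]
      rw [this, natStarts_cons_zero_zero _, ih hm]
      have hfil : ((natStarts ys).map (fun i => i + m)).filter (fun k => decide (k ≠ 0))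
          = (natStarts ys).map (fun i => i + m) := by
        apply List.filter_eq_self.mpr
        intro a ha
        rcases List.mem_map.mp ha with ⟨i, _, rfl⟩
        simp; omega
      rw [List.filter_cons_of_neg (by simp), hfil, List.map_map]
      refine congrArg₂ _ rfl (List.map_congr_left ?_)
      intro i _
      simp [Function.comp]; omega
theorem okN_cons (x : Int) (xs : List Int) (k : Nat) :
    okN (x :: xs) (k + 1) = okN xs k := by
  have e1 : k + 1 + 1 = (k + 1) + 1 := rfl
  have e2 : k + 1 + 2 = (k + 2) + 1 := by omega
  have e3 : k + 1 + 3 = (k + 3) + 1 := by omega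
  rw [okN, okN, e1, e2, e3, List.getD_cons_succ, List.getD_cons_succ, List.getD_cons_succ,
    List.length_cons, decide_eq_decide.mpr (by omega : k + 1 + 4 ≤ xs.length + 1 ↔ k + 4 ≤ xs.length)]

theorem okN_repl_shift (k : Nat) (ys : List Int) (i : Nat) :
    okN (List.replicate k (0 : Int) ++ ys) (i + k) = okN ys i := by
  induction k with
  | zero => simp
  | succ m ih =>
    have h : List.replicate (m + 1) (0 : Int) ++ ys
        = (0 : Int) :: (List.replicate m (0 : Int) ++ ys) := by
      simp [List.replicate_succ]
    have e : i + (m + 1) = (i + m) + 1 := by omega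
    rw [h, e, okN_cons, ih]

theorem okN_repl_zero (k : Nat) (hk : 1 ≤ k) (ys : List Int) (hy : headNZ ys) :
    okN (List.replicate k (0 : Int) ++ ys) 0 = decide (4 ≤ k) := by
  by_cases h4 : 4 ≤ k
  · have hg : ∀ j, j < k → (List.replicate k (0 : Int) ++ ys).getD j 0 = 0 := by
      intro j hj
      rw [List.getD_append _ _ _ _ (by simpa using hj)]
      simp
    rw [okN, hg 1 (by omega), hg 2 (by omega), hg 3 (by omega)]
    simp [List.length_replicate, List.length_append]
    omega
  · rcases hy with h0 | ⟨y, t, rfl, hy⟩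
    · subst h0
      have hlen : (List.replicate k (0 : Int) ++ ([] : List Int)).length = k := by simp
      rw [okN, hlen]
      simp [decide_eq_false (by omega : ¬ (0 + 4 ≤ k))]
    · have : k = 1 ∨ k = 2 ∨ k = 3 := by omega
      rcases this with rfl | rfl | rfl
      · simp [okN, hy]
      · simp [okN, hy]
      · simp [okN, hy]

theorem zpLoopA_cons_ne (x : Int) (hx : x ≠ 0) (xs : List Int) (zc : Int) (f : Bool) :
    zpLoopA (x :: xs) zc 0 f = zpLoopA xs zc 0 f := by
  simp [zpLoopA, hx]

theorem zpLoopA_zeros (k : Nat) (ys : List Int) (zc cz : Int) :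
    zpLoopA (List.replicate k (0 : Int) ++ ys) zc cz true = zpLoopA ys zc (cz + (k : Nat)) true := by
  induction k generalizing cz with
  | zero => simp
  | succ m ih =>
    have h : List.replicate (m + 1) (0 : Int) ++ ys
        = (0 : Int) :: (List.replicate m (0 : Int) ++ ys) := by
      simp [List.replicate_succ]
    rw [h]
    show zpLoopA ((0 : Int) :: (List.replicate m (0 : Int) ++ ys)) zc cz true = _
    rw [show zpLoopA ((0 : Int) :: (List.replicate m (0 : Int) ++ ys)) zc cz true
        = zpLoopA (List.replicate m (0 : Int) ++ ys) zc (cz + 1) true by simp [zpLoopA]]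
    rw [ih (cz + 1)]
    congr 1
    push_cast
    ring

theorem zpLoopA_nil_expand (zc cz : Int) :
    zpLoopA [] zc cz true = if 0 < cz then (if cz < 4 then 0 else zc + 1) else zc := by
  simp [zpLoopA]

theorem zpLoopA_cons_flush (y : Int) (hy : y ≠ 0) (t : List Int) (zc cz : Int) (hcz : 0 < cz) :
    zpLoopA (y :: t) zc cz true = if cz < 4 then 0 else zpLoopA t (zc + 1) 0 true := by
  simp only [zpLoopA]
  rw [if_neg (show ¬ ((y == 0) = true) by simpa using hy), if_pos hcz]

-- one maximal zero block followed by ys (empty or starting nonzero)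
theorem zp_block (k : Nat) (hk1 : 1 ≤ k) (ys : List Int) (hy : headNZ ys)
    (Hys : ∀ zc : Int, zpLoopA ys zc 0 true =
      if (natStarts ys).all (okN ys) then zc + ((natStarts ys).length : Int) else 0)
    (zc : Int) :
    zpLoopA (List.replicate k (0 : Int) ++ ys) zc 0 true =
      if (natStarts (List.replicate k (0 : Int) ++ ys)).all
          (okN (List.replicate k (0 : Int) ++ ys)) then
        zc + ((natStarts (List.replicate k (0 : Int) ++ ys)).length : Int)
      else 0 := by
  rw [zpLoopA_zeros, natStarts_replicate k hk1 ys hy]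
  have hallshift : ((natStarts ys).map (fun i => i + k)).all
      (okN (List.replicate k (0 : Int) ++ ys)) = (natStarts ys).all (okN ys) := by
    rw [List.all_map]
    refine List.all_congr rfl ?_
    intro i
    simpa [Function.comp] using okN_repl_shift k ys i
  rw [List.all_cons, hallshift, okN_repl_zero k hk1 ys hy]
  have hkpos : (0 : Int) < 0 + (k : Nat) := by omega
  rcases hy with rfl | ⟨y, t, rfl, hy0⟩
  · rw [zpLoopA_nil_expand, if_pos hkpos]
    simp only [natStarts, List.length_nil, List.range_zero, List.filter_nil, List.all_nil,
      Bool.and_true, List.map_nil, List.length_cons, List.length_nil]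
    by_cases h4 : 4 ≤ k
    · rw [if_neg (by omega), if_pos (by simpa using h4)]; simp
    · rw [if_pos (by omega), if_neg (by simpa using h4)]
  · rw [zpLoopA_cons_flush y hy0 t zc _ hkpos,
      show zpLoopA t (zc + 1) 0 true = zpLoopA (y :: t) (zc + 1) 0 true from
        (zpLoopA_cons_ne y hy0 t (zc + 1) true).symm,
      Hys (zc + 1)]
    by_cases h4 : 4 ≤ k
    · rw [if_neg (by omega)]
      by_cases hall : (natStarts (y :: t)).all (okN (y :: t)) = true
      · rw [if_pos hall, if_pos (by simp [hall, h4]), List.length_cons, List.length_map]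
        push_cast; ring
      · rw [if_neg hall, if_neg (by simp [hall])]
    · rw [if_pos (by omega), if_neg (by simp [h4])]

-- main invariant: A's loop (between runs, flag already true) computes B's aggregate
theorem zp_main : ∀ (n : Nat) (arr : List Int), arr.length ≤ n → ∀ zc : Int,
    zpLoopA arr zc 0 true =
      if (natStarts arr).all (okN arr) then zc + ((natStarts arr).length : Int) else 0 := by
  intro n
  induction n with
  | zero =>
    intro arr h zc
    have : arr = [] := List.eq_nil_of_length_eq_zero (by omega)
    subst this
    simp [zpLoopA, natStarts]
  | succ m ih =>
    intro arr h zc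
    cases arr with
    | nil => simp [zpLoopA, natStarts]
    | cons x xs =>
      by_cases hx : x = 0
      · subst hx
        have hdecomp : (0 : Int) :: xs =
            List.replicate (((0 : Int) :: xs).takeWhile (fun a => a == 0)).length (0 : Int)
              ++ ((0 : Int) :: xs).dropWhile (fun a => a == 0) := by
          conv_lhs => rw [← List.takeWhile_append_dropWhile (p := fun a => a == 0)
            (l := (0 : Int) :: xs)]
          congr 1
          apply List.eq_replicate_of_mem
          intro a ha
          have := List.mem_takeWhile_imp ha
          simpa using this
        have hk1 : 1 ≤ (((0 : Int) :: xs).takeWhile (fun a => a == 0)).length := by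
          simp
        have hy : headNZ (((0 : Int) :: xs).dropWhile (fun a => a == 0)) := by
          cases hys : ((0 : Int) :: xs).dropWhile (fun a => a == 0) with
          | nil => exact Or.inl rfl
          | cons y t =>
            refine Or.inr ⟨y, t, rfl, ?_⟩
            have hne : ((0 : Int) :: xs).dropWhile (fun a => a == 0) ≠ [] := by
              rw [hys]; simp
            have hp := List.head_dropWhile_not (p := fun a : Int => a == 0)
              (l := (0 : Int) :: xs) hne
            have hhead : (((0 : Int) :: xs).dropWhile (fun a => a == 0)).head hne = y := by
              simp only [List.head_eq_iff_head?_eq_some, hys, List.head?_cons]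
            rw [hhead] at hp
            simpa using hp
        have hlen : (((0 : Int) :: xs).dropWhile (fun a => a == 0)).length ≤ m := by
          rw [List.dropWhile_cons_of_pos (by simp)]
          have h1 := List.length_dropWhile_le (fun a : Int => a == 0) xs
          simp at h
          omega
        have key := zp_block _ hk1 _ hy (fun zc' => ih _ hlen zc') zc
        rw [← hdecomp] at key
        exact key
      · rw [zpLoopA_cons_ne x hx xs zc true, ih xs (by simp at h; omega) zc,
          natStarts_cons_ne x hx xs]
        have hall : ((natStarts xs).map (fun k => k + 1)).all (okN (x :: xs))
            = (natStarts xs).all (okN xs) := by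
          rw [List.all_map]
          refine List.all_congr rfl ?_
          intro i
          simpa [Function.comp] using okN_cons x xs i
        rw [hall, List.length_map]
theorem zpLoopA_false_true : ∀ (arr : List Int), zpLoopA arr 0 0 false = zpLoopA arr 0 0 true := by
  intro arr
  induction arr with
  | nil => simp [zpLoopA]
  | cons x xs ih =>
    by_cases hx : x = 0
    · subst hx; simp [zpLoopA]
    · rw [zpLoopA_cons_ne x hx xs 0 false, zpLoopA_cons_ne x hx xs 0 true, ih]


-- ===== VERDICT (by name: the statement is the Claim_ definition above) =====
theorem zero_plentiful_spec : Claim_equal_zero_plentiful := by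
  intro arr _
  unfold Spec_zero_plentiful
  rw [show zero_plentiful arr = zpLoopA arr 0 0 false from rfl, zpLoopA_false_true,
    zp_main arr.length arr le_rfl 0, alt_eq_nat]
  simp
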